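-- pv_equiv track=rewrite | github.com/JavaBEStudyLog/Algorithm | 4week/yelim/4-1-2.py | solution
-- ===== SOURCE A (Python) =====
-- from collections import deque
--
-- def bfs(graph, start, n):
--     visited = [False] * (n + 1)
--     queue = deque([start])
--     visited[start] = True
--     count = 1
--
--     while queue:
--         node = queue.popleft()
--         for neighbor in graph[node]:
--             if not visited[neighbor]:
--                 visited[neighbor] = True
--                 queue.append(neighbor)
--                 count += 1
--
--     return count
--
-- def solution(n, wires):
--     answer = float('inf')
--
--     for i in range(len(wires)):
--         graph = [[] for _ in range(n + 1)]
--         for j in range(len(wires)):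
--             if i == j:
--                 continue
--             v1, v2 = wires[j]
--             graph[v1].append(v2)
--             graph[v2].append(v1)
--
--         count1 = bfs(graph, 1, n)
--         count2 = n - count1
--         answer = min(answer, abs(count1 - count2))
--
--     return answer
-- ===== SOURCE B (Python) =====
-- def solution(n, wires):
--     best = None
--     for i in range(len(wires)):
--         in_comp = [False] * (n + 1)
--         in_comp[1] = True
--         changed = True
--         while changed:
--             changed = False
--             for j, (a, b) in enumerate(wires):
--                 if j != i and in_comp[a] != in_comp[b]:
--                     in_comp[a] = True
--                     in_comp[b] = True
--                     changed = True
--         size = sum(in_comp)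
--         d = abs(n - 2 * size)
--         if best is None or d < best:
--             best = d
--     return best
-- ===== Notes on version B (the rewrite author's own statement) =====
-- stated objective: alternative
-- what changed: Per removed wire, A builds an adjacency-list graph and runs a BFS with a visited array and a queue; B builds no graph and keeps no queue: it runs Bellman-Ford-style relaxation passes directly over the wire list (marking both endpoints of a wire whenever exactly one is in node 1's component) until the component stops growing, then takes |n - 2*size|.
-- outside the precondition, e.g. on solution(3, []): A returns inf, B returns None
import Mathlib
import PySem

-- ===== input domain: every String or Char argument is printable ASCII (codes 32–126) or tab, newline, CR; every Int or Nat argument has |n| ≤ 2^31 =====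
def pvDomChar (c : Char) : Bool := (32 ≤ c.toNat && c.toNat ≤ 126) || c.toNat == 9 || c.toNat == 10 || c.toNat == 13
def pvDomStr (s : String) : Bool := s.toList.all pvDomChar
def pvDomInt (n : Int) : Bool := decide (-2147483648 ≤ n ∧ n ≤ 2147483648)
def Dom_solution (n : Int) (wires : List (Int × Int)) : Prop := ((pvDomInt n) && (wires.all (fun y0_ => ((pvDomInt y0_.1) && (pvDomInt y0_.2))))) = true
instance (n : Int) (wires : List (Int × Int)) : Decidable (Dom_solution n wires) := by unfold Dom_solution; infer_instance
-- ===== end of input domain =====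

-- B replaces A's per-edge graph build + BFS queue by Bellman-Ford-style relaxation passes
-- straight over the wire list (alternative algorithm, same results).

-- ===== PORT A =====
-- used by the termination lemma bfsVisit_measure just below (and by the proofs at the bottom)
theorem pySetD_get_false {V : List Bool} {i : Int} (h : PySem.List.pyGet? V i = some false) :
    ∃ j : Nat, j < V.length ∧ V[j]? = some false ∧ PySem.List.pySetD V i true = V.set j true := by
  unfold PySem.List.pyGet? at h
  cases hj : PySem.List.pyIdx? V.length i with
  | none => rw [hj] at h; simp at h
  | some j =>
      rw [hj] at h; simp at h
      exact ⟨j, (List.getElem?_eq_some_iff.mp h).1, h, by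
        unfold PySem.List.pySetD PySem.List.pySet?; rw [hj]; rfl⟩

-- one step of A's inner 'for neighbor in graph[node]' loop; state = (visited, queue, count)
def bfsVisit (st : List Bool × List Int × Int) (nb : Int) : List Bool × List Int × Int :=
  match PySem.List.pyGet? st.1 nb with
  | some false => (PySem.List.pySetD st.1 nb true, st.2.1 ++ [nb], st.2.2 + 1)
  | some true => st
  | none => st   -- Python raises IndexError here; such inputs are outside Pre_solution

-- termination measure fact for the port's 'while queue' loop (cited by decreasing_by)
theorem bfsVisit_measure (st : List Bool × List Int × Int) (nb : Int) :
    2 * ((bfsVisit st nb).1.count false) + (bfsVisit st nb).2.1.length ≤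
      2 * (st.1.count false) + st.2.1.length := by
  unfold bfsVisit
  rcases h : PySem.List.pyGet? st.1 nb with _ | b
  · simp
  · cases b with
    | true => simp
    | false =>
        obtain ⟨j, hlt, hjv, hset⟩ := pySetD_get_false h
        have hjf : st.1[j] = false := (List.getElem?_eq_some_iff.mp hjv).2
        have hcount := List.count_set (a := true) (b := false) (l := st.1) (i := j) hlt
        have hpos : 0 < st.1.count false := List.count_pos_iff.mpr (List.mem_of_getElem? hjv)
        simp only [hset, List.length_append, List.length_cons, List.length_nil]
        simp [hjf] at hcount
        omega

theorem bfsVisit_fold_measure (nbrs : List Int) (st : List Bool × List Int × Int) :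
    2 * ((nbrs.foldl bfsVisit st).1.count false) + (nbrs.foldl bfsVisit st).2.1.length ≤
      2 * (st.1.count false) + st.2.1.length := by
  induction nbrs generalizing st with
  | nil => simp
  | cons x t ih => exact le_trans (ih (bfsVisit st x)) (bfsVisit_measure st x)

def bfsLoop (graph : List (List Int)) (visited : List Bool) (queue : List Int) (count : Int) : Int :=
  match queue with
  | [] => count
  | node :: rest =>
      -- Python raises IndexError on graph[node] out of range; outside Pre_solution ([] here)
      let st := (PySem.List.pyGetD graph node []).foldl bfsVisit (visited, rest, count)
      bfsLoop graph st.1 st.2.1 st.2.2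
termination_by 2 * visited.count false + queue.length
decreasing_by
  have h := bfsVisit_fold_measure (PySem.List.pyGetD graph node []) (visited, rest, count)
  simp only [List.length_cons] at h ⊢
  omega

def bfs (graph : List (List Int)) (start : Int) (n : Int) : Int :=
  let visited := List.replicate (n + 1).toNat false
  let visited := PySem.List.pySetD visited start true   -- visited[start] = True (IndexError outside Pre_)
  bfsLoop graph visited [start] 1

def buildGraph (n : Int) (wires : List (Int × Int)) (i : Int) : List (List Int) :=
  (PySem.List.pyRange 0 wires.length 1).foldl
    (fun g j =>
      if i = j then g
      else
        let p := PySem.List.pyGetD wires j (0, 0)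
        let g := PySem.List.pySetD g p.1 (PySem.List.pyGetD g p.1 [] ++ [p.2])
        PySem.List.pySetD g p.2 (PySem.List.pyGetD g p.2 [] ++ [p.1]))
    (List.replicate (n + 1).toNat [])

def solution (n : Int) (wires : List (Int × Int)) : Int :=
  ((PySem.List.pyRange 0 wires.length 1).foldl
    (fun answer i =>
      let graph := buildGraph n wires i
      let count1 := bfs graph 1 n
      let count2 := n - count1
      match answer with                 -- answer = float('inf') modelled as none
      | none => some |count1 - count2|
      | some a => some (min a |count1 - count2|))
    none).getD 0    -- still none only when wires = [], excluded by Pre_ (Python returns float inf)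

-- ===== PORT B =====
-- one wire of one relaxation pass; state = (in_comp, changed):
-- 'if j != i and in_comp[a] != in_comp[b]: mark both; changed = True'
def relaxStep (i : Int) (st : List Bool × Bool) (kw : Int × (Int × Int)) : List Bool × Bool :=
  if kw.1 ≠ i ∧ PySem.List.pyGetD st.1 kw.2.1 false ≠ PySem.List.pyGetD st.1 kw.2.2 false then
    (PySem.List.pySetD (PySem.List.pySetD st.1 kw.2.1 true) kw.2.2 true, true)
  else st

-- 'while changed:' — the count-false conjunct only makes the loop total in Lean;
-- wherever Pre_solution holds, changed = True implies it (proved below)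
def relaxLoop (i : Int) (wires : List (Int × Int)) (V : List Bool) : List Bool :=
  let st := (PySem.List.enumerate wires).foldl (relaxStep i) (V, false)
  if _h : st.2 = true ∧ st.1.count false < V.count false then relaxLoop i wires st.1 else V
termination_by V.count false
decreasing_by exact _h.2

def solution_alt (n : Int) (wires : List (Int × Int)) : Int :=
  ((PySem.List.pyRange 0 wires.length 1).foldl
    (fun best i =>
      let inComp := PySem.List.pySetD (List.replicate (n + 1).toNat false) 1 true
      let inComp := relaxLoop i wires inComp
      let size := (inComp.count true : Int)    -- sum(in_comp) over booleans = number of True entries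
      let d := |n - 2 * size|
      match best with                   -- best = None modelled as none
      | none => some d
      | some b => some (if d < b then d else b))
    none).getD 0

-- ===== PRECONDITION & SPEC =====
-- Pre_ is exactly where A returns an int: at least one node (n ≥ 1) and one wire, every wire
-- endpoint a Python-valid index -(n+1)..n of A's length-(n+1) arrays.  Outside it A raises
-- IndexError, or returns float('inf') (wires = [], not an int).
def Pre_solution (n : Int) (wires : List (Int × Int)) : Prop :=
  1 ≤ n ∧ wires ≠ [] ∧ ∀ p ∈ wires, -(n + 1) ≤ p.1 ∧ p.1 ≤ n ∧ -(n + 1) ≤ p.2 ∧ p.2 ≤ n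
instance (n : Int) (wires : List (Int × Int)) : Decidable (Pre_solution n wires) := by
  unfold Pre_solution; infer_instance

def pvWitness_solution : Int × (List (Int × Int)) := (4, [(1, 2), (2, 3), (3, 4)])

def Spec_solution (n : Int) (wires : List (Int × Int)) (out : Int) : Prop := out = solution_alt n wires
instance (n : Int) (wires : List (Int × Int)) (out : Int) : Decidable (Spec_solution n wires out) := by
  unfold Spec_solution; infer_instance

-- ===== CLAIM (what is proved, stated in full; the proofs are below) =====
def Claim_equal_solution : Prop := ∀ (n : Int) (wires : List (Int × Int)), Dom_solution n wires → Pre_solution n wires → Spec_solution n wires (solution n wires)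

-- ===== LEMMAS AND PROOFS =====

-- ----- Python index resolution (negative indices wrap) -----

theorem pyIdx?_lt {L : Nat} {x : Int} {j : Nat} (h : PySem.List.pyIdx? L x = some j) : j < L := by
  unfold PySem.List.pyIdx? at h
  split at h
  · split at h
    · simp at h; omega
    · cases h
  · split at h
    · simp at h
      rename_i h1 h2
      omega
    · cases h

theorem pyIdx?_some {L : Nat} {x : Int} (h1 : -(L : Int) ≤ x) (h2 : x < L) :
    ∃ j, PySem.List.pyIdx? L x = some j := by
  unfold PySem.List.pyIdx?
  split
  · exact ⟨x.toNat, rfl⟩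
  · exact ⟨L - (-x).toNat, rfl⟩

theorem pyGet?_eqj {α : Type} {xs : List α} {x : Int} {j : Nat}
    (h : PySem.List.pyIdx? xs.length x = some j) : PySem.List.pyGet? xs x = xs[j]? := by
  unfold PySem.List.pyGet?
  rw [h]
  rfl

theorem pyGetD_eqj {α : Type} {xs : List α} {x : Int} {j : Nat} (d : α)
    (h : PySem.List.pyIdx? xs.length x = some j) : PySem.List.pyGetD xs x d = xs.getD j d := by
  unfold PySem.List.pyGetD
  rw [pyGet?_eqj h, List.getD_eq_getElem?_getD]

theorem pySetD_eqj {α : Type} {xs : List α} {x : Int} {j : Nat} (v : α)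
    (h : PySem.List.pyIdx? xs.length x = some j) : PySem.List.pySetD xs x v = xs.set j v := by
  unfold PySem.List.pySetD PySem.List.pySet?
  rw [h]
  rfl

theorem getD_set_eq {α : Type} (xs : List α) (j : Nat) (v d : α) (h : j < xs.length) :
    (xs.set j v).getD j d = v := by
  simp [List.getD_eq_getElem?_getD, h]

theorem getD_set_ne {α : Type} (xs : List α) {j k : Nat} (v d : α) (h : j ≠ k) :
    (xs.set j v).getD k d = xs.getD k d := by
  simp [List.getD_eq_getElem?_getD, h]

theorem length_pySetD' {α : Type} (g : List α) (a : Int) (x : α) :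
    (PySem.List.pySetD g a x).length = g.length := by
  unfold PySem.List.pySetD PySem.List.pySet?
  cases h : PySem.List.pyIdx? g.length a <;> simp

-- ----- counting trues -----

theorem count_true_filter_range (V : List Bool) :
    V.count true = ((List.range V.length).filter (fun j => V.getD j false)).length := by
  induction V with
  | nil => rfl
  | cons b T ih =>
      rw [List.length_cons, List.range_succ_eq_map, List.filter_cons]
      have hmap : (List.map Nat.succ (List.range T.length)).filter (fun j => (b :: T).getD j false) =
          List.map Nat.succ ((List.range T.length).filter (fun j => T.getD j false)) := by
        rw [List.filter_map]
        congr 1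
      rw [hmap]
      cases b <;> simp [ih]

theorem count_mono_pointwise :
    ∀ (V W : List Bool), V.length = W.length →
      (∀ j, V.getD j false = true → W.getD j false = true) →
      V.count true ≤ W.count true ∧ (V ≠ W → V.count true < W.count true) := by
  intro V
  induction V with
  | nil =>
      intro W hlen _
      have : W = [] := List.eq_nil_of_length_eq_zero hlen.symm
      subst this
      exact ⟨le_refl _, fun h => absurd rfl h⟩
  | cons a Vt ih =>
      intro W hlen hmono
      cases W with
      | nil => simp at hlen
      | cons b Wt =>
          have hlen' : Vt.length = Wt.length := by simpa using hlen
          have hmono' : ∀ j, Vt.getD j false = true → Wt.getD j false = true := by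
            intro j hj
            have := hmono (j + 1) (by simpa using hj)
            simpa using this
          have hab : a = true → b = true := by
            intro ha
            have := hmono 0 (by simpa using ha)
            simpa using this
          obtain ⟨hle, hlt⟩ := ih Wt hlen' hmono'
          constructor
          · cases a with
            | false =>
                cases b with
                | false => simpa [List.count_cons] using hle
                | true => simp only [List.count_cons]; simp; omega
            | true =>
                have hb := hab rfl
                subst hb
                simp only [List.count_cons]
                simp
                omega
          · intro hne
            have hcases : a ≠ b ∨ Vt ≠ Wt := by
              by_cases h1 : a = b
              · subst h1
                exact Or.inr (fun h => hne (by rw [h]))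
              · exact Or.inl h1
            cases a with
            | true =>
                have hb := hab rfl
                subst hb
                have hst : Vt ≠ Wt := by
                  rcases hcases with h1 | h1
                  · exact absurd rfl h1
                  · exact h1
                have := hlt hst
                simp only [List.count_cons]
                simp
                omega
            | false =>
                cases b with
                | true =>
                    simp only [List.count_cons]
                    simp
                    omega
                | false =>
                    have hst : Vt ≠ Wt := by
                      rcases hcases with h1 | h1
                      · exact absurd rfl h1
                      · exact h1
                    have := hlt hst
                    simp only [List.count_cons]
                    simp
                    omega

-- ----- the adjacency lists built by port A, characterised by resolved slot -----

def addEdge (g : List (List Int)) (a b : Int) : List (List Int) :=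
  PySem.List.pySetD (PySem.List.pySetD g a (PySem.List.pyGetD g a [] ++ [b])) b
    (PySem.List.pyGetD (PySem.List.pySetD g a (PySem.List.pyGetD g a [] ++ [b])) b [] ++ [a])

def gStep (i : Int) (g : List (List Int)) (jw : Int × (Int × Int)) : List (List Int) :=
  if i = jw.1 then g else addEdge g jw.2.1 jw.2.2

theorem length_addEdge (g : List (List Int)) (a b : Int) :
    (addEdge g a b).length = g.length := by
  unfold addEdge
  rw [length_pySetD', length_pySetD']

theorem mem_setAppend (g : List (List Int)) (a x : Int) {ja : Nat}
    (hρ : PySem.List.pyIdx? g.length a = some ja) (j : Nat) (v : Int) :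
    (v ∈ (PySem.List.pySetD g a (PySem.List.pyGetD g a [] ++ [x])).getD j [] ↔
      (v ∈ g.getD j [] ∨ (j = ja ∧ v = x))) := by
  have hlt : ja < g.length := pyIdx?_lt hρ
  rw [pySetD_eqj _ hρ, pyGetD_eqj _ hρ]
  by_cases he : j = ja
  · subst he
    rw [getD_set_eq _ _ _ _ hlt]
    simp
  · rw [getD_set_ne _ _ _ (fun h => he h.symm)]
    simp [he]

theorem mem_addEdge (g : List (List Int)) (a b : Int) {ja jb : Nat}
    (hρa : PySem.List.pyIdx? g.length a = some ja)
    (hρb : PySem.List.pyIdx? g.length b = some jb) (j : Nat) (v : Int) :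
    (v ∈ (addEdge g a b).getD j [] ↔
      (v ∈ g.getD j [] ∨ (j = ja ∧ v = b) ∨ (j = jb ∧ v = a))) := by
  unfold addEdge
  have hρb' : PySem.List.pyIdx?
      (PySem.List.pySetD g a (PySem.List.pyGetD g a [] ++ [b])).length b = some jb := by
    rw [length_pySetD']
    exact hρb
  rw [mem_setAppend _ b a hρb' j v, mem_setAppend g a b hρa j v]
  tauto

theorem buildGraph_eq (n : Int) (wires : List (Int × Int)) (i : Int) :
    buildGraph n wires i =
      (PySem.List.enumerate wires).foldl (gStep i) (List.replicate (n + 1).toNat []) := by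
  unfold buildGraph
  rw [PySem.List.enumerate_eq_map_pyRange wires ((0, 0) : Int × Int), List.foldl_map]
  rfl

theorem buildFold (i : Int) (L : Nat) :
    ∀ (l : List (Int × (Int × Int))) (g : List (List Int)) (P : Nat → Int → Prop),
      g.length = L →
      (∀ kw ∈ l, (∃ ja, PySem.List.pyIdx? L kw.2.1 = some ja) ∧
                 (∃ jb, PySem.List.pyIdx? L kw.2.2 = some jb)) →
      (∀ j : Nat, ∀ v, (v ∈ g.getD j [] ↔ P j v)) →
      (l.foldl (gStep i) g).length = L ∧
      (∀ j : Nat, ∀ v,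
        (v ∈ (l.foldl (gStep i) g).getD j [] ↔
          P j v ∨ ∃ kw ∈ l, kw.1 ≠ i ∧
            ((PySem.List.pyIdx? L kw.2.1 = some j ∧ v = kw.2.2) ∨
             (PySem.List.pyIdx? L kw.2.2 = some j ∧ v = kw.2.1)))) := by
  intro l
  induction l with
  | nil =>
      intro g P hlen _ hchar
      refine ⟨hlen, ?_⟩
      intro j v
      simpa using hchar j v
  | cons kw t ih =>
      intro g P hlen hb hchar
      simp only [List.foldl_cons]
      by_cases hski : i = kw.1
      · have hstep : gStep i g kw = g := by unfold gStep; rw [if_pos hski]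
        rw [hstep]
        obtain ⟨r1, r2⟩ := ih g P hlen (fun q hq => hb q (List.mem_cons_of_mem _ hq)) hchar
        refine ⟨r1, ?_⟩
        intro j v
        rw [r2 j v]
        constructor
        · rintro (h | ⟨q, hq, hne, hh⟩)
          · exact Or.inl h
          · exact Or.inr ⟨q, List.mem_cons_of_mem _ hq, hne, hh⟩
        · rintro (h | ⟨q, hq, hne, hh⟩)
          · exact Or.inl h
          · rcases List.mem_cons.mp hq with rfl | hq'
            · exact absurd hski.symm hne
            · exact Or.inr ⟨q, hq', hne, hh⟩
      · have hstep : gStep i g kw = addEdge g kw.2.1 kw.2.2 := by unfold gStep; rw [if_neg hski]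
        rw [hstep]
        obtain ⟨⟨ja, hja⟩, ⟨jb, hjb⟩⟩ := hb kw List.mem_cons_self
        have hja' : PySem.List.pyIdx? g.length kw.2.1 = some ja := by rw [hlen]; exact hja
        have hjb' : PySem.List.pyIdx? g.length kw.2.2 = some jb := by rw [hlen]; exact hjb
        have hlen' : (addEdge g kw.2.1 kw.2.2).length = L := by rw [length_addEdge]; exact hlen
        obtain ⟨r1, r2⟩ := ih (addEdge g kw.2.1 kw.2.2)
          (fun j v => P j v ∨ (j = ja ∧ v = kw.2.2) ∨ (j = jb ∧ v = kw.2.1))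
          hlen' (fun q hq => hb q (List.mem_cons_of_mem _ hq))
          (by
            intro j v
            rw [mem_addEdge g kw.2.1 kw.2.2 hja' hjb' j v, hchar j v])
        refine ⟨r1, ?_⟩
        intro j v
        rw [r2 j v]
        constructor
        · rintro ((h | ⟨rfl, rfl⟩ | ⟨rfl, rfl⟩) | ⟨q, hq, hne, hh⟩)
          · exact Or.inl h
          · exact Or.inr ⟨kw, List.mem_cons_self, fun h => hski h.symm, Or.inl ⟨hja, rfl⟩⟩
          · exact Or.inr ⟨kw, List.mem_cons_self, fun h => hski h.symm, Or.inr ⟨hjb, rfl⟩⟩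
          · exact Or.inr ⟨q, List.mem_cons_of_mem _ hq, hne, hh⟩
        · rintro (h | ⟨q, hq, hne, hh⟩)
          · exact Or.inl (Or.inl h)
          · rcases List.mem_cons.mp hq with rfl | hq'
            · rcases hh with ⟨h1, h2⟩ | ⟨h1, h2⟩
              · have : ja = j := by rw [hja] at h1; exact (Option.some.injEq _ _).mp h1
                exact Or.inl (Or.inr (Or.inl ⟨this.symm, h2⟩))
              · have : jb = j := by rw [hjb] at h1; exact (Option.some.injEq _ _).mp h1
                exact Or.inl (Or.inr (Or.inr ⟨this.symm, h2⟩))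
            · exact Or.inr ⟨q, hq', hne, hh⟩

-- the step relation between resolved slots induced by the wires with index i removed
def StepI (wires : List (Int × Int)) (i : Int) (L : Nat) (j j' : Nat) : Prop :=
  ∃ kw ∈ PySem.List.enumerate wires, kw.1 ≠ i ∧
    ((PySem.List.pyIdx? L kw.2.1 = some j ∧ PySem.List.pyIdx? L kw.2.2 = some j') ∨
     (PySem.List.pyIdx? L kw.2.1 = some j' ∧ PySem.List.pyIdx? L kw.2.2 = some j))

def ReachI (wires : List (Int × Int)) (i : Int) (L : Nat) (j : Nat) : Prop :=
  Relation.ReflTransGen (StepI wires i L) 1 j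

theorem buildGraph_char {n : Int} (wires : List (Int × Int)) (i : Int)
    (hres : ∀ kw ∈ PySem.List.enumerate wires,
      (∃ ja, PySem.List.pyIdx? (n + 1).toNat kw.2.1 = some ja) ∧
      (∃ jb, PySem.List.pyIdx? (n + 1).toNat kw.2.2 = some jb)) :
    (buildGraph n wires i).length = (n + 1).toNat ∧
    (∀ j : Nat, ∀ v,
      (v ∈ (buildGraph n wires i).getD j [] ↔
        ∃ kw ∈ PySem.List.enumerate wires, kw.1 ≠ i ∧
          ((PySem.List.pyIdx? (n + 1).toNat kw.2.1 = some j ∧ v = kw.2.2) ∨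
           (PySem.List.pyIdx? (n + 1).toNat kw.2.2 = some j ∧ v = kw.2.1)))) := by
  rw [buildGraph_eq]
  have hinit : ∀ j : Nat, ∀ v : Int,
      (v ∈ (List.replicate (n + 1).toNat ([] : List Int)).getD j [] ↔ False) := by
    intro j v
    rw [List.getD_eq_getElem?_getD]
    cases h : (List.replicate (n + 1).toNat ([] : List Int))[j]? with
    | none => simp
    | some w =>
        have : w = [] := List.eq_of_mem_replicate (List.mem_of_getElem? h)
        subst this
        simp
  obtain ⟨r1, r2⟩ := buildFold i (n + 1).toNat (PySem.List.enumerate wires)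
    (List.replicate (n + 1).toNat []) (fun _ _ => False) (by simp) hres hinit
  refine ⟨r1, ?_⟩
  intro j v
  rw [r2 j v]
  simp


-- ----- the BFS inner fold and while-loop (port A) -----

theorem bfsFold (nbrs : List Int) :
    ∀ (V : List Bool) (Q : List Int) (c : Int),
    (∀ x ∈ nbrs, ∃ j, PySem.List.pyIdx? V.length x = some j) →
    (nbrs.foldl bfsVisit (V, Q, c)).1.length = V.length ∧
    (c = (V.count true : Int) →
      (nbrs.foldl bfsVisit (V, Q, c)).2.2 = ((nbrs.foldl bfsVisit (V, Q, c)).1.count true : Int)) ∧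
    (∀ j, V.getD j false = true → (nbrs.foldl bfsVisit (V, Q, c)).1.getD j false = true) ∧
    (∀ x ∈ Q, x ∈ (nbrs.foldl bfsVisit (V, Q, c)).2.1) ∧
    (∀ x ∈ (nbrs.foldl bfsVisit (V, Q, c)).2.1,
      x ∈ Q ∨ (x ∈ nbrs ∧ ∃ j, PySem.List.pyIdx? V.length x = some j ∧
               (nbrs.foldl bfsVisit (V, Q, c)).1.getD j false = true)) ∧
    (∀ x ∈ nbrs, ∀ j, PySem.List.pyIdx? V.length x = some j →
      (nbrs.foldl bfsVisit (V, Q, c)).1.getD j false = true) ∧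
    (∀ j, (nbrs.foldl bfsVisit (V, Q, c)).1.getD j false = true →
      V.getD j false = true ∨
      ∃ x, x ∈ nbrs ∧ PySem.List.pyIdx? V.length x = some j ∧
        x ∈ (nbrs.foldl bfsVisit (V, Q, c)).2.1) := by
  induction nbrs with
  | nil => intro V Q c _; simp
  | cons x t ih =>
      intro V Q c hb
      obtain ⟨jx, hjx⟩ := hb x List.mem_cons_self
      have hxlt : jx < V.length := pyIdx?_lt hjx
      have hbt : ∀ y ∈ t, ∃ j, PySem.List.pyIdx? V.length y = some j :=
        fun y hy => hb y (List.mem_cons_of_mem _ hy)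
      have hget : PySem.List.pyGet? V x = some V[jx] := by
        rw [pyGet?_eqj hjx]
        exact List.getElem?_eq_getElem hxlt
      cases hvx : V[jx] with
      | true =>
          have hstep : bfsVisit (V, Q, c) x = (V, Q, c) := by
            unfold bfsVisit; rw [hget, hvx]
          simp only [List.foldl_cons, hstep]
          obtain ⟨g1, g2, g3, g4, g5, g6, g7⟩ := ih V Q c hbt
          refine ⟨g1, g2, g3, g4, ?_, ?_, ?_⟩
          · intro y hy
            rcases g5 y hy with h | ⟨hm, h2⟩
            · exact Or.inl h
            · exact Or.inr ⟨List.mem_cons_of_mem _ hm, h2⟩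
          · intro y hy j hj
            rcases List.mem_cons.mp hy with rfl | hy'
            · have : j = jx := by rw [hjx] at hj; exact ((Option.some.injEq _ _).mp hj).symm
              subst this
              apply g3
              simp [List.getD_eq_getElem?_getD, List.getElem?_eq_getElem hxlt, hvx]
            · exact g6 y hy' j hj
          · intro j hj
            rcases g7 j hj with h | ⟨y, hm, h2, h3⟩
            · exact Or.inl h
            · exact Or.inr ⟨y, List.mem_cons_of_mem _ hm, h2, h3⟩
      | false =>
          have hstep : bfsVisit (V, Q, c) x =
              (V.set jx true, Q ++ [x], c + 1) := by
            unfold bfsVisit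
            rw [hget, hvx]
            simp only
            congr 1
            exact pySetD_eqj true hjx
          simp only [List.foldl_cons, hstep]
          have hlen' : (V.set jx true).length = V.length := by simp
          obtain ⟨g1, g2, g3, g4, g5, g6, g7⟩ :=
            ih (V.set jx true) (Q ++ [x]) (c + 1) (by rw [hlen']; exact hbt)
          have hmonoset : ∀ j, V.getD j false = true → (V.set jx true).getD j false = true := by
            intro j hj
            by_cases hjj : jx = j
            · subst hjj; exact getD_set_eq _ _ _ _ hxlt
            · rw [getD_set_ne _ _ _ hjj]; exact hj
          have hselftrue : (V.set jx true).getD jx false = true := getD_set_eq _ _ _ _ hxlt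
          refine ⟨by rw [g1, hlen'], ?_, ?_, ?_, ?_, ?_, ?_⟩
          · intro hc
            apply g2
            have := List.count_set (a := true) (b := true) (l := V) (i := jx) hxlt
            simp [hvx] at this
            rw [this]; omega
          · intro j hj; exact g3 j (hmonoset j hj)
          · intro y hy; exact g4 y (List.mem_append_left _ hy)
          · intro y hy
            rcases g5 y hy with h | ⟨hm, j, h2, h3⟩
            · rcases List.mem_append.mp h with h' | h'
              · exact Or.inl h'
              · have : y = x := by simpa using h'
                subst this
                exact Or.inr ⟨List.mem_cons_self, jx, hjx, g3 _ hselftrue⟩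
            · rw [hlen'] at h2
              exact Or.inr ⟨List.mem_cons_of_mem _ hm, j, h2, h3⟩
          · intro y hy j hj
            rcases List.mem_cons.mp hy with rfl | hy'
            · have : j = jx := by rw [hjx] at hj; exact ((Option.some.injEq _ _).mp hj).symm
              subst this
              exact g3 _ hselftrue
            · exact g6 y hy' j (by rw [hlen']; exact hj)
          · intro j hj
            rcases g7 j hj with h | ⟨y, hm, h2, h3⟩
            · by_cases hjj : jx = j
              · subst hjj
                refine Or.inr ⟨x, List.mem_cons_self, hjx, ?_⟩
                exact g4 x (List.mem_append_right _ (List.mem_singleton.mpr rfl))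
              · rw [getD_set_ne _ _ _ hjj] at h
                exact Or.inl h
            · rw [hlen'] at h2
              exact Or.inr ⟨y, List.mem_cons_of_mem _ hm, h2, h3⟩

theorem bfsLoop_spec (graph : List (List Int)) (L : Nat) (R : Nat → Prop)
    (hGlen : graph.length = L)
    (hG : ∀ j : Nat, ∀ v ∈ graph.getD j [], ∃ j', PySem.List.pyIdx? L v = some j')
    (hR : ∀ j : Nat, R j → ∀ v ∈ graph.getD j [], ∀ j',
      PySem.List.pyIdx? L v = some j' → R j') :
    ∀ (μ : Nat) (V : List Bool) (Q : List Int) (c : Int),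
    2 * V.count false + Q.length ≤ μ →
    V.length = L →
    c = (V.count true : Int) →
    (∀ x ∈ Q, ∃ j, PySem.List.pyIdx? L x = some j ∧ V.getD j false = true) →
    (∀ j : Nat, V.getD j false = true → R j) →
    (∀ j : Nat, V.getD j false = true → (∀ x ∈ Q, PySem.List.pyIdx? L x ≠ some j) →
      ∀ v ∈ graph.getD j [], ∀ j', PySem.List.pyIdx? L v = some j' → V.getD j' false = true) →
    ∃ V' : List Bool, bfsLoop graph V Q c = (V'.count true : Int) ∧ V'.length = L ∧
      (∀ j, V.getD j false = true → V'.getD j false = true) ∧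
      (∀ j, V'.getD j false = true → R j) ∧
      (∀ j : Nat, V'.getD j false = true → ∀ v ∈ graph.getD j [], ∀ j',
        PySem.List.pyIdx? L v = some j' → V'.getD j' false = true) := by
  intro μ
  induction μ with
  | zero =>
      intro V Q c hμ hlen hc hQ hRV hcl
      match Q with
      | [] =>
          refine ⟨V, ?_, hlen, fun j h => h, hRV, ?_⟩
          · rw [bfsLoop]; exact hc
          · intro j hj v hv j' hj'
            exact hcl j hj (by simp) v hv j' hj'
      | node :: rest => simp at hμ
  | succ μ ih =>
      intro V Q c hμ hlen hc hQ hRV hcl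
      match Q with
      | [] =>
          refine ⟨V, ?_, hlen, fun j h => h, hRV, ?_⟩
          · rw [bfsLoop]; exact hc
          · intro j hj v hv j' hj'
            exact hcl j hj (by simp) v hv j' hj'
      | node :: rest =>
          obtain ⟨jn, hjn, hnvis⟩ := hQ node List.mem_cons_self
          have hadjn : PySem.List.pyGetD graph node [] = graph.getD jn [] := by
            apply pyGetD_eqj
            rw [hGlen]
            exact hjn
          have hb : ∀ x ∈ PySem.List.pyGetD graph node [],
              ∃ j, PySem.List.pyIdx? V.length x = some j := by
            rw [hadjn, hlen]
            intro x hx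
            exact hG jn x hx
          obtain ⟨g1, g2, g3, g4, g5, g6, g7⟩ :=
            bfsFold (PySem.List.pyGetD graph node []) V rest c hb
          set st := (PySem.List.pyGetD graph node []).foldl bfsVisit (V, rest, c) with hst
          have hμ' : 2 * st.1.count false + st.2.1.length ≤ μ := by
            have h := bfsVisit_fold_measure (PySem.List.pyGetD graph node []) (V, rest, c)
            simp only [← hst, List.length_cons] at h hμ
            omega
          have hQ' : ∀ x ∈ st.2.1, ∃ j, PySem.List.pyIdx? L x = some j ∧
              st.1.getD j false = true := by
            intro x hx
            rcases g5 x hx with h | ⟨_, j, h2, h3⟩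
            · obtain ⟨j, a1, a2⟩ := hQ x (List.mem_cons_of_mem _ h)
              exact ⟨j, a1, g3 _ a2⟩
            · rw [hlen] at h2
              exact ⟨j, h2, h3⟩
          have hRnode : R jn := hRV jn hnvis
          have hRV' : ∀ j : Nat, st.1.getD j false = true → R j := by
            intro j hj
            rcases g7 j hj with h | ⟨x, hm, h2, h3⟩
            · exact hRV j h
            · rw [hlen] at h2
              exact hR jn hRnode x (by rw [← hadjn]; exact hm) j h2
          have hcl' : ∀ j : Nat, st.1.getD j false = true →
              (∀ x ∈ st.2.1, PySem.List.pyIdx? L x ≠ some j) →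
              ∀ v ∈ graph.getD j [], ∀ j', PySem.List.pyIdx? L v = some j' →
                st.1.getD j' false = true := by
            intro j hj hjq v hv j' hj'
            by_cases hjnq : j = jn
            · subst hjnq
              exact g6 v (by rw [hadjn]; exact hv) j' (by rw [hlen]; exact hj')
            · rcases g7 j hj with hold | ⟨x, hxm, h2, h3⟩
              · have hnoQ : ∀ x ∈ node :: rest, PySem.List.pyIdx? L x ≠ some j := by
                  intro x hx
                  rcases List.mem_cons.mp hx with rfl | hx'
                  · rw [hjn]
                    intro h
                    exact hjnq ((Option.some.injEq _ _).mp h).symm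
                  · exact hjq x (g4 x hx')
                exact g3 _ (hcl j hold hnoQ v hv j' hj')
              · rw [hlen] at h2
                exact absurd h2 (hjq x h3)
          obtain ⟨V', r1, r2, r3, r4, r5⟩ :=
            ih st.1 st.2.1 st.2.2 hμ' (by rw [g1]; exact hlen) (g2 hc) hQ' hRV' hcl'
          refine ⟨V', ?_, r2, fun j h => r3 j (g3 j h), r4, r5⟩
          rw [bfsLoop]
          exact r1


-- ----- the relaxation passes (port B) -----

-- the list component of relaxStep, studied on its own
def relaxEdge (i : Int) (V : List Bool) (kw : Int × (Int × Int)) : List Bool :=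
  if kw.1 ≠ i ∧ PySem.List.pyGetD V kw.2.1 false ≠ PySem.List.pyGetD V kw.2.2 false then
    PySem.List.pySetD (PySem.List.pySetD V kw.2.1 true) kw.2.2 true
  else V

theorem pySetD_none {α : Type} {V : List α} {x : Int} (v : α)
    (h : PySem.List.pyIdx? V.length x = none) : PySem.List.pySetD V x v = V := by
  unfold PySem.List.pySetD PySem.List.pySet?
  rw [h]
  rfl

theorem setTrue_mono (V : List Bool) (x : Int) (j : Nat)
    (h : V.getD j false = true) : (PySem.List.pySetD V x true).getD j false = true := by
  cases hρ : PySem.List.pyIdx? V.length x with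
  | none => rw [pySetD_none true hρ]; exact h
  | some jx =>
      rw [pySetD_eqj true hρ]
      by_cases hjj : jx = j
      · subst hjj; exact getD_set_eq _ _ _ _ (pyIdx?_lt hρ)
      · rw [getD_set_ne _ _ _ hjj]; exact h

theorem relaxEdge_len (i : Int) (V : List Bool) (kw : Int × (Int × Int)) :
    (relaxEdge i V kw).length = V.length := by
  unfold relaxEdge
  split
  · rw [length_pySetD', length_pySetD']
  · rfl

theorem relaxEdge_mono (i : Int) (V : List Bool) (kw : Int × (Int × Int)) (j : Nat)
    (h : V.getD j false = true) : (relaxEdge i V kw).getD j false = true := by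
  unfold relaxEdge
  split
  · have h1 := setTrue_mono V kw.2.1 j h
    have h2 := setTrue_mono (PySem.List.pySetD V kw.2.1 true) kw.2.2 j h1
    exact h2
  · exact h

theorem relax_slots_true (V : List Bool) (a b : Int) {ja jb : Nat}
    (hja : PySem.List.pyIdx? V.length a = some ja)
    (hjb : PySem.List.pyIdx? V.length b = some jb) :
    (PySem.List.pySetD (PySem.List.pySetD V a true) b true).getD ja false = true ∧
    (PySem.List.pySetD (PySem.List.pySetD V a true) b true).getD jb false = true := by
  have hjb' : PySem.List.pyIdx? (PySem.List.pySetD V a true).length b = some jb := by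
    rw [length_pySetD']; exact hjb
  rw [pySetD_eqj true hjb', pySetD_eqj true hja]
  have hlen : (V.set ja true).length = V.length := by simp
  constructor
  · by_cases hjj : jb = ja
    · subst hjj; exact getD_set_eq _ _ _ _ (by rw [hlen]; exact pyIdx?_lt hjb)
    · rw [getD_set_ne _ _ _ hjj]
      exact getD_set_eq _ _ _ _ (pyIdx?_lt hja)
  · exact getD_set_eq _ _ _ _ (by rw [hlen]; exact pyIdx?_lt hjb)

theorem relax_new_true (V : List Bool) (a b : Int) {ja jb : Nat} (j : Nat)
    (hja : PySem.List.pyIdx? V.length a = some ja)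
    (hjb : PySem.List.pyIdx? V.length b = some jb)
    (h : (PySem.List.pySetD (PySem.List.pySetD V a true) b true).getD j false = true) :
    j = ja ∨ j = jb ∨ V.getD j false = true := by
  have hjb' : PySem.List.pyIdx? (PySem.List.pySetD V a true).length b = some jb := by
    rw [length_pySetD']; exact hjb
  rw [pySetD_eqj true hjb', pySetD_eqj true hja] at h
  by_cases h2 : jb = j
  · exact Or.inr (Or.inl h2.symm)
  · rw [getD_set_ne _ _ _ h2] at h
    by_cases h1 : ja = j
    · exact Or.inl h1.symm
    · rw [getD_set_ne _ _ _ h1] at h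
      exact Or.inr (Or.inr h)

theorem relaxEdge_sound (i : Int) (L : Nat) (R : Nat → Prop) (V : List Bool)
    (kw : Int × (Int × Int)) (hlen : V.length = L)
    (hres : (∃ ja, PySem.List.pyIdx? L kw.2.1 = some ja) ∧
            (∃ jb, PySem.List.pyIdx? L kw.2.2 = some jb))
    (hkw : kw.1 ≠ i → ∀ ja jb, PySem.List.pyIdx? L kw.2.1 = some ja →
      PySem.List.pyIdx? L kw.2.2 = some jb → (R ja → R jb) ∧ (R jb → R ja))
    (hV : ∀ j, V.getD j false = true → R j) :
    ∀ j, (relaxEdge i V kw).getD j false = true → R j := by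
  unfold relaxEdge
  split
  · rename_i hc
    obtain ⟨⟨ja, hja⟩, ⟨jb, hjb⟩⟩ := hres
    have hja' : PySem.List.pyIdx? V.length kw.2.1 = some ja := by rw [hlen]; exact hja
    have hjb' : PySem.List.pyIdx? V.length kw.2.2 = some jb := by rw [hlen]; exact hjb
    have hga : PySem.List.pyGetD V kw.2.1 false = V.getD ja false := pyGetD_eqj false hja'
    have hgb : PySem.List.pyGetD V kw.2.2 false = V.getD jb false := pyGetD_eqj false hjb'
    have hRboth : R ja ∧ R jb := by
      rw [hga, hgb] at hc
      cases hva : V.getD ja false with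
      | true =>
          have h1 := hV ja hva
          exact ⟨h1, (hkw hc.1 ja jb hja hjb).1 h1⟩
      | false =>
          have hvb : V.getD jb false = true := by
            cases hvb : V.getD jb false with
            | true => rfl
            | false => rw [hva, hvb] at hc; exact absurd rfl hc.2
          have h1 := hV jb hvb
          exact ⟨(hkw hc.1 ja jb hja hjb).2 h1, h1⟩
    intro j hj
    rcases relax_new_true V kw.2.1 kw.2.2 j hja' hjb' hj with rfl | rfl | h
    · exact hRboth.1
    · exact hRboth.2
    · exact hV j h
  · exact hV

theorem relaxEdge_fires (i : Int) (L : Nat) (V : List Bool) (kw : Int × (Int × Int))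
    (hlen : V.length = L)
    (hres : (∃ ja, PySem.List.pyIdx? L kw.2.1 = some ja) ∧
            (∃ jb, PySem.List.pyIdx? L kw.2.2 = some jb))
    (hfire : kw.1 ≠ i ∧ PySem.List.pyGetD V kw.2.1 false ≠ PySem.List.pyGetD V kw.2.2 false) :
    V.count true < (relaxEdge i V kw).count true := by
  obtain ⟨⟨ja, hja⟩, ⟨jb, hjb⟩⟩ := hres
  have hja' : PySem.List.pyIdx? V.length kw.2.1 = some ja := by rw [hlen]; exact hja
  have hjb' : PySem.List.pyIdx? V.length kw.2.2 = some jb := by rw [hlen]; exact hjb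
  have hga : PySem.List.pyGetD V kw.2.1 false = V.getD ja false := pyGetD_eqj false hja'
  have hgb : PySem.List.pyGetD V kw.2.2 false = V.getD jb false := pyGetD_eqj false hjb'
  have hstep : relaxEdge i V kw =
      PySem.List.pySetD (PySem.List.pySetD V kw.2.1 true) kw.2.2 true := by
    unfold relaxEdge
    rw [if_pos hfire]
  obtain ⟨hta, htb⟩ := relax_slots_true V kw.2.1 kw.2.2 hja' hjb'
  have hne : V ≠ relaxEdge i V kw := by
    intro heq
    have hd := hfire.2
    rw [hga, hgb] at hd
    cases hva : V.getD ja false with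
    | true =>
        have hvb : V.getD jb false = false := by
          cases hvb : V.getD jb false with
          | true => rw [hva, hvb] at hd; exact absurd rfl hd
          | false => rfl
        have : V.getD jb false = true := by rw [heq, hstep]; exact htb
        rw [hvb] at this; cases this
    | false =>
        have : V.getD ja false = true := by rw [heq, hstep]; exact hta
        rw [hva] at this; cases this
  exact (count_mono_pointwise V (relaxEdge i V kw)
    (by rw [relaxEdge_len]) (fun j hj => relaxEdge_mono i V kw j hj)).2 hne

theorem foldRelax_len (i : Int) : ∀ (l : List (Int × (Int × Int))) (V : List Bool),
    (l.foldl (relaxEdge i) V).length = V.length := by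
  intro l
  induction l with
  | nil => intro V; rfl
  | cons kw t ih =>
      intro V
      simp only [List.foldl_cons]
      rw [ih, relaxEdge_len]

theorem foldRelax_mono (i : Int) : ∀ (l : List (Int × (Int × Int))) (V : List Bool) (j : Nat),
    V.getD j false = true → (l.foldl (relaxEdge i) V).getD j false = true := by
  intro l
  induction l with
  | nil => intro V j h; exact h
  | cons kw t ih =>
      intro V j h
      simp only [List.foldl_cons]
      exact ih _ j (relaxEdge_mono i V kw j h)

theorem foldRelax_count_le (i : Int) (l : List (Int × (Int × Int))) (V : List Bool) :
    V.count true ≤ (l.foldl (relaxEdge i) V).count true :=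
  (count_mono_pointwise V (l.foldl (relaxEdge i) V)
    (by rw [foldRelax_len]) (fun j hj => foldRelax_mono i l V j hj)).1

theorem foldRelax_sound (i : Int) (L : Nat) (R : Nat → Prop) :
    ∀ (l : List (Int × (Int × Int))) (V : List Bool), V.length = L →
    (∀ kw ∈ l, (∃ ja, PySem.List.pyIdx? L kw.2.1 = some ja) ∧
               (∃ jb, PySem.List.pyIdx? L kw.2.2 = some jb)) →
    (∀ kw ∈ l, kw.1 ≠ i → ∀ ja jb, PySem.List.pyIdx? L kw.2.1 = some ja →
      PySem.List.pyIdx? L kw.2.2 = some jb → (R ja → R jb) ∧ (R jb → R ja)) →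
    (∀ j, V.getD j false = true → R j) →
    ∀ j, (l.foldl (relaxEdge i) V).getD j false = true → R j := by
  intro l
  induction l with
  | nil => intro V _ _ _ hV j h; exact hV j h
  | cons kw t ih =>
      intro V hlen hres hkw hV
      simp only [List.foldl_cons]
      exact ih (relaxEdge i V kw) (by rw [relaxEdge_len]; exact hlen)
        (fun q hq => hres q (List.mem_cons_of_mem _ hq))
        (fun q hq => hkw q (List.mem_cons_of_mem _ hq))
        (relaxEdge_sound i L R V kw hlen (hres kw List.mem_cons_self)
          (hkw kw List.mem_cons_self) hV)

theorem count_bool_total : ∀ V : List Bool, V.count true + V.count false = V.length := by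
  intro V
  induction V with
  | nil => rfl
  | cons b T ih => cases b <;> simp <;> omega

theorem relaxStep_eq (i : Int) (V : List Bool) (fl : Bool) (kw : Int × (Int × Int)) :
    relaxStep i (V, fl) kw =
      (relaxEdge i V kw,
        if kw.1 ≠ i ∧ PySem.List.pyGetD V kw.2.1 false ≠ PySem.List.pyGetD V kw.2.2 false
        then true else fl) := by
  by_cases hc : kw.1 ≠ i ∧ PySem.List.pyGetD V kw.2.1 false ≠ PySem.List.pyGetD V kw.2.2 false
  · simp [relaxStep, relaxEdge, hc]
  · simp [relaxStep, relaxEdge, hc]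

theorem relaxFlag_mono (i : Int) : ∀ (l : List (Int × (Int × Int))) (V : List Bool),
    (l.foldl (relaxStep i) (V, true)).2 = true := by
  intro l
  induction l with
  | nil => intro V; rfl
  | cons kw t ih =>
      intro V
      rw [List.foldl_cons, relaxStep_eq, ite_self]
      exact ih _

theorem relaxStep_fst (i : Int) : ∀ (l : List (Int × (Int × Int))) (V : List Bool) (fl : Bool),
    (l.foldl (relaxStep i) (V, fl)).1 = l.foldl (relaxEdge i) V := by
  intro l
  induction l with
  | nil => intro V fl; rfl
  | cons kw t ih =>
      intro V fl
      rw [List.foldl_cons, List.foldl_cons, relaxStep_eq]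
      exact ih _ _

theorem relaxEdge_id (i : Int) (V : List Bool) (kw : Int × (Int × Int))
    (hc : ¬(kw.1 ≠ i ∧ PySem.List.pyGetD V kw.2.1 false ≠ PySem.List.pyGetD V kw.2.2 false)) :
    relaxEdge i V kw = V := by
  unfold relaxEdge
  rw [if_neg hc]

theorem flag_false (i : Int) : ∀ (l : List (Int × (Int × Int))) (V : List Bool),
    (l.foldl (relaxStep i) (V, false)).2 = false →
    (l.foldl (relaxStep i) (V, false)).1 = V ∧
    (∀ kw ∈ l, kw.1 ≠ i →
      PySem.List.pyGetD V kw.2.1 false = PySem.List.pyGetD V kw.2.2 false) := by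
  intro l
  induction l with
  | nil => intro V _; exact ⟨rfl, by simp⟩
  | cons kw t ih =>
      intro V h
      rw [List.foldl_cons, relaxStep_eq] at h ⊢
      by_cases hc : kw.1 ≠ i ∧
          PySem.List.pyGetD V kw.2.1 false ≠ PySem.List.pyGetD V kw.2.2 false
      · rw [if_pos hc] at h
        rw [relaxFlag_mono i t _] at h
        cases h
      · rw [if_neg hc] at h ⊢
        rw [relaxEdge_id i V kw hc] at h ⊢
        obtain ⟨h1, h2⟩ := ih V h
        refine ⟨h1, ?_⟩
        intro q hq hqne
        rcases List.mem_cons.mp hq with rfl | hq'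
        · by_cases hd : PySem.List.pyGetD V q.2.1 false = PySem.List.pyGetD V q.2.2 false
          · exact hd
          · exact absurd ⟨hqne, hd⟩ hc
        · exact h2 q hq' hqne

theorem flag_true_count (i : Int) (L : Nat) :
    ∀ (l : List (Int × (Int × Int))) (V : List Bool), V.length = L →
    (∀ kw ∈ l, (∃ ja, PySem.List.pyIdx? L kw.2.1 = some ja) ∧
               (∃ jb, PySem.List.pyIdx? L kw.2.2 = some jb)) →
    (l.foldl (relaxStep i) (V, false)).2 = true →
    V.count true < ((l.foldl (relaxStep i) (V, false)).1).count true := by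
  intro l
  induction l with
  | nil => intro V _ _ h; cases h
  | cons kw t ih =>
      intro V hlen hres h
      rw [List.foldl_cons, relaxStep_eq] at h ⊢
      by_cases hc : kw.1 ≠ i ∧
          PySem.List.pyGetD V kw.2.1 false ≠ PySem.List.pyGetD V kw.2.2 false
      · rw [if_pos hc]
        rw [relaxStep_fst i t _ true]
        have h1 := relaxEdge_fires i L V kw hlen (hres kw List.mem_cons_self) hc
        have h2 := foldRelax_count_le i t (relaxEdge i V kw)
        omega
      · rw [if_neg hc] at h ⊢
        rw [relaxEdge_id i V kw hc] at h ⊢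
        exact ih V hlen (fun q hq => hres q (List.mem_cons_of_mem _ hq)) h

theorem relaxLoop_spec (i : Int) (wires : List (Int × Int)) (L : Nat) (R : Nat → Prop)
    (hres : ∀ kw ∈ PySem.List.enumerate wires,
      (∃ ja, PySem.List.pyIdx? L kw.2.1 = some ja) ∧
      (∃ jb, PySem.List.pyIdx? L kw.2.2 = some jb))
    (hkw : ∀ kw ∈ PySem.List.enumerate wires, kw.1 ≠ i →
      ∀ ja jb, PySem.List.pyIdx? L kw.2.1 = some ja → PySem.List.pyIdx? L kw.2.2 = some jb →
        (R ja → R jb) ∧ (R jb → R ja)) :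
    ∀ (μ : Nat) (V : List Bool), V.count false ≤ μ → V.length = L →
    (∀ j, V.getD j false = true → R j) →
    (relaxLoop i wires V).length = L ∧
    (∀ j, V.getD j false = true → (relaxLoop i wires V).getD j false = true) ∧
    (∀ kw ∈ PySem.List.enumerate wires, kw.1 ≠ i →
      PySem.List.pyGetD (relaxLoop i wires V) kw.2.1 false =
        PySem.List.pyGetD (relaxLoop i wires V) kw.2.2 false) ∧
    (∀ j, (relaxLoop i wires V).getD j false = true → R j) := by
  intro μ
  induction μ with
  | zero =>
      intro V hμ hlen hV
      rw [relaxLoop]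
      split
      · rename_i h
        exact absurd h.2 (by omega)
      · rename_i h
        have hflag : ((PySem.List.enumerate wires).foldl (relaxStep i) (V, false)).2 = false := by
          cases hfl : ((PySem.List.enumerate wires).foldl (relaxStep i) (V, false)).2 with
          | false => rfl
          | true =>
              exfalso
              have h1 := flag_true_count i L (PySem.List.enumerate wires) V hlen hres hfl
              have h2 : ((PySem.List.enumerate wires).foldl (relaxStep i) (V, false)).1.length
                  = V.length := by rw [relaxStep_fst, foldRelax_len]
              have h3 := count_bool_total V
              have h4 := count_bool_total
                ((PySem.List.enumerate wires).foldl (relaxStep i) (V, false)).1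
              exact h ⟨hfl, by omega⟩
        obtain ⟨_, hbal⟩ := flag_false i (PySem.List.enumerate wires) V hflag
        exact ⟨hlen, fun j hj => hj, hbal, hV⟩
  | succ μ ih =>
      intro V hμ hlen hV
      rw [relaxLoop]
      split
      · rename_i h
        have hfst : ((PySem.List.enumerate wires).foldl (relaxStep i) (V, false)).1 =
            (PySem.List.enumerate wires).foldl (relaxEdge i) V := relaxStep_fst i _ V false
        obtain ⟨r1, r2, r3, r4⟩ := ih ((PySem.List.enumerate wires).foldl (relaxStep i) (V, false)).1
          (by omega)
          (by rw [hfst, foldRelax_len]; exact hlen)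
          (by
            rw [hfst]
            exact foldRelax_sound i L R (PySem.List.enumerate wires) V hlen hres
              (fun kw hkwm => hkw kw hkwm) hV)
        refine ⟨r1, ?_, r3, r4⟩
        intro j hj
        apply r2
        rw [hfst]
        exact foldRelax_mono i _ V j hj
      · rename_i h
        have hflag : ((PySem.List.enumerate wires).foldl (relaxStep i) (V, false)).2 = false := by
          cases hfl : ((PySem.List.enumerate wires).foldl (relaxStep i) (V, false)).2 with
          | false => rfl
          | true =>
              exfalso
              have h1 := flag_true_count i L (PySem.List.enumerate wires) V hlen hres hfl
              have h2 : ((PySem.List.enumerate wires).foldl (relaxStep i) (V, false)).1.length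
                  = V.length := by rw [relaxStep_fst, foldRelax_len]
              have h3 := count_bool_total V
              have h4 := count_bool_total
                ((PySem.List.enumerate wires).foldl (relaxStep i) (V, false)).1
              exact h ⟨hfl, by omega⟩
        obtain ⟨_, hbal⟩ := flag_false i (PySem.List.enumerate wires) V hflag
        exact ⟨hlen, fun j hj => hj, hbal, hV⟩

-- ----- per removed wire: BFS count = relaxation count -----

theorem per_i (n : Int) (wires : List (Int × Int)) (hn : 1 ≤ n)
    (hw : ∀ p ∈ wires, -(n + 1) ≤ p.1 ∧ p.1 ≤ n ∧ -(n + 1) ≤ p.2 ∧ p.2 ≤ n) (i : Int) :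
    bfs (buildGraph n wires i) 1 n =
      ((relaxLoop i wires
          (PySem.List.pySetD (List.replicate (n + 1).toNat false) 1 true)).count true : Int) := by
  have hL2 : 2 ≤ (n + 1).toNat := by omega
  have hLc : (((n + 1).toNat : Nat) : Int) = n + 1 := by omega
  -- every wire endpoint resolves to a slot of the length-(n+1) arrays
  have hres : ∀ kw ∈ PySem.List.enumerate wires,
      (∃ ja, PySem.List.pyIdx? (n + 1).toNat kw.2.1 = some ja) ∧
      (∃ jb, PySem.List.pyIdx? (n + 1).toNat kw.2.2 = some jb) := by
    intro kw hkw
    obtain ⟨k, hk, rfl⟩ := (PySem.List.mem_enumerate_iff _ _ _).mp hkw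
    obtain ⟨h1, h2, h3, h4⟩ := hw _ (List.getElem_mem hk)
    dsimp only
    exact ⟨pyIdx?_some (by omega) (by omega), pyIdx?_some (by omega) (by omega)⟩
  obtain ⟨hGlen, hchar⟩ := buildGraph_char wires i hres
  have hstep_adj : ∀ j j' : Nat,
      ((∃ v ∈ (buildGraph n wires i).getD j [], PySem.List.pyIdx? (n + 1).toNat v = some j') ↔
        StepI wires i (n + 1).toNat j j') := by
    intro j j'
    constructor
    · rintro ⟨v, hv, hρv⟩
      rcases (hchar j v).mp hv with ⟨kw, hkw, hne, ⟨h1, rfl⟩ | ⟨h1, rfl⟩⟩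
      · exact ⟨kw, hkw, hne, Or.inl ⟨h1, hρv⟩⟩
      · exact ⟨kw, hkw, hne, Or.inr ⟨hρv, h1⟩⟩
    · rintro ⟨kw, hkw, hne, ⟨h1, h2⟩ | ⟨h1, h2⟩⟩
      · exact ⟨kw.2.2, (hchar j kw.2.2).mpr ⟨kw, hkw, hne, Or.inl ⟨h1, rfl⟩⟩, h2⟩
      · exact ⟨kw.2.1, (hchar j kw.2.1).mpr ⟨kw, hkw, hne, Or.inr ⟨h2, rfl⟩⟩, h1⟩
  have hG : ∀ j : Nat, ∀ v ∈ (buildGraph n wires i).getD j [],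
      ∃ j', PySem.List.pyIdx? (n + 1).toNat v = some j' := by
    intro j v hv
    rcases (hchar j v).mp hv with ⟨kw, hkw, _, ⟨_, rfl⟩ | ⟨_, rfl⟩⟩
    · exact (hres kw hkw).2
    · exact (hres kw hkw).1
  have hR : ∀ j : Nat, ReachI wires i (n + 1).toNat j →
      ∀ v ∈ (buildGraph n wires i).getD j [], ∀ j',
        PySem.List.pyIdx? (n + 1).toNat v = some j' → ReachI wires i (n + 1).toNat j' := by
    intro j hj v hv j' hj'
    exact Relation.ReflTransGen.tail hj ((hstep_adj j j').mp ⟨v, hv, hj'⟩)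
  -- the initial visited array (shared by both ports)
  have hρ1 : PySem.List.pyIdx? (n + 1).toNat (1 : Int) = some 1 := by
    unfold PySem.List.pyIdx?
    rw [if_pos (by norm_num), if_pos (by omega)]
    rfl
  have hV0 : PySem.List.pySetD (List.replicate (n + 1).toNat false) (1 : Int) true =
      (List.replicate (n + 1).toNat false).set 1 true := by
    apply pySetD_eqj
    simpa using hρ1
  have hV0len : ((List.replicate (n + 1).toNat false).set 1 true).length = (n + 1).toNat := by simp
  have hV0get : ∀ j : Nat,
      ((List.replicate (n + 1).toNat false).set 1 true).getD j false = true ↔ j = 1 := by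
    intro j
    rw [List.getD_eq_getElem?_getD, List.getElem?_set]
    by_cases hj : 1 = j
    · subst hj
      rw [if_pos rfl, if_pos (show 1 < (List.replicate (n + 1).toNat (false : Bool)).length by
        simp; omega)]
      simp
    · rw [if_neg hj]
      rcases h : (List.replicate (n + 1).toNat (false : Bool))[j]? with _ | w
      · simp [Ne.symm hj]
      · have : w = false := List.eq_of_mem_replicate (List.mem_of_getElem? h)
        subst this
        simp [Ne.symm hj]
  have hV0count : ((List.replicate (n + 1).toNat false).set 1 true).count true = 1 := by
    have h1 : (1 : Nat) < (List.replicate (n + 1).toNat (false : Bool)).length := by simp; omega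
    rw [List.count_set h1]
    simp [List.count_replicate]
  -- run the BFS loop lemma
  obtain ⟨V', e1, e2, e3, e4, e5⟩ :=
    bfsLoop_spec (buildGraph n wires i) (n + 1).toNat (ReachI wires i (n + 1).toNat) hGlen hG hR
      (2 * ((List.replicate (n + 1).toNat false).set 1 true).count false + 1)
      ((List.replicate (n + 1).toNat false).set 1 true) [1] 1
      (le_refl _) hV0len (by rw [hV0count]; exact Nat.cast_one.symm)
      (by
        intro x hx
        rw [List.mem_singleton] at hx
        subst hx
        exact ⟨1, hρ1, (hV0get 1).mpr rfl⟩)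
      (by
        intro j hj
        rw [hV0get j] at hj
        subst hj
        exact Relation.ReflTransGen.refl)
      (by
        intro j hj hnotin
        rw [hV0get j] at hj
        subst hj
        exact absurd hρ1 (hnotin 1 (List.mem_singleton.mpr rfl)))
  -- run the relaxation loop lemma
  set V0 := (List.replicate (n + 1).toNat false).set 1 true with hV0def
  have hstepR : ∀ kw ∈ PySem.List.enumerate wires, kw.1 ≠ i →
      ∀ ja jb, PySem.List.pyIdx? (n + 1).toNat kw.2.1 = some ja →
        PySem.List.pyIdx? (n + 1).toNat kw.2.2 = some jb →
        (ReachI wires i (n + 1).toNat ja → ReachI wires i (n + 1).toNat jb) ∧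
        (ReachI wires i (n + 1).toNat jb → ReachI wires i (n + 1).toNat ja) := by
    intro kw hkw hne ja jb hja hjb
    constructor
    · intro h
      exact Relation.ReflTransGen.tail h ⟨kw, hkw, hne, Or.inl ⟨hja, hjb⟩⟩
    · intro h
      exact Relation.ReflTransGen.tail h ⟨kw, hkw, hne, Or.inr ⟨hja, hjb⟩⟩
  obtain ⟨f1, f2, f3, f4⟩ :=
    relaxLoop_spec i wires (n + 1).toNat (ReachI wires i (n + 1).toNat) hres hstepR
      (V0.count false) V0 (le_refl _) hV0len
      (by
        intro j hj
        rw [hV0get j] at hj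
        subst hj
        exact Relation.ReflTransGen.refl)
  set F := relaxLoop i wires V0 with hF
  have hFsound : ∀ j, F.getD j false = true → ReachI wires i (n + 1).toNat j := f4
  have hFlen : F.length = (n + 1).toNat := f1
  have hF1 : F.getD 1 false = true := f2 1 ((hV0get 1).mpr rfl)
  have hFcomplete : ∀ j, ReachI wires i (n + 1).toNat j → F.getD j false = true := by
    intro j hj
    induction hj with
    | refl => exact hF1
    | tail h hstep ih =>
        rename_i b c
        obtain ⟨kw, hkw, hne, ⟨h1, h2⟩ | ⟨h1, h2⟩⟩ := hstep
        · have hbal := f3 kw hkw hne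
          rw [pyGetD_eqj false (by rw [hFlen]; exact h1),
            pyGetD_eqj false (by rw [hFlen]; exact h2)] at hbal
          rw [← hbal]
          exact ih
        · have hbal := f3 kw hkw hne
          rw [pyGetD_eqj false (by rw [hFlen]; exact h1),
            pyGetD_eqj false (by rw [hFlen]; exact h2)] at hbal
          rw [hbal]
          exact ih
  have hAcomplete : ∀ j, ReachI wires i (n + 1).toNat j → V'.getD j false = true := by
    intro j hj
    induction hj with
    | refl => exact e3 1 ((hV0get 1).mpr rfl)
    | tail h hstep ih =>
        rename_i b c
        obtain ⟨v, hv, hρv⟩ := (hstep_adj b c).mpr hstep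
        exact e5 b ih v hv c hρv
  -- the two final arrays have the same trues, hence the same count
  have hpt : ∀ j, V'.getD j false = F.getD j false := by
    intro j
    cases h1 : V'.getD j false with
    | true => rw [hFcomplete j (e4 j h1)]
    | false =>
        cases h2 : F.getD j false with
        | true =>
            have h3 := hAcomplete j (hFsound j h2)
            rw [h1] at h3
            cases h3
        | false => rfl
  have hcounts : V'.count true = F.count true := by
    rw [count_true_filter_range V', count_true_filter_range F, e2, hFlen]
    congr 1
    apply List.filter_congr
    intro j _
    exact hpt j
  rw [hV0, ← hF]
  show bfsLoop (buildGraph n wires i)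
      (PySem.List.pySetD (List.replicate (n + 1).toNat false) 1 true) [1] 1
      = (F.count true : Int)
  rw [hV0, e1, hcounts]

-- ===== VERDICT (by name: the statement is the Claim_ definition above) =====
theorem solution_spec : Claim_equal_solution := by
  unfold Claim_equal_solution
  intro n wires _ hpre
  obtain ⟨hn, _, hw⟩ := hpre
  unfold Spec_solution solution solution_alt
  refine congrArg (fun o : Option Int => o.getD 0) ?_
  apply PySem.List.foldl_congr_mem
  intro acc i _
  dsimp only
  have hpi := per_i n wires hn hw i
  rw [hpi]
  have habs : ∀ L : Int, |L - (n - L)| = |n - 2 * L| := by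
    intro L
    rw [show L - (n - L) = -(n - 2 * L) by ring, abs_neg]
  cases acc with
  | none => dsimp only; rw [habs]
  | some a =>
      dsimp only
      rw [habs]
      congr 1
      rw [Int.min_def]
      split_ifs <;> omega
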